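-- pv_equiv track=rewrite | github.com/FrancoLiberali/tp3-software-defined-networks | controller/extensions/shortest_paths_finder.py | _keep_only_shortests
-- ===== SOURCE A (Python) =====
-- def _keep_only_shortests(paths):
--     if len(paths) > 0:
--         shortest = len(paths[0])
--         for path in paths:
--             if len(path) < shortest:
--                 shortest = len(path)
--         return list(filter(lambda path: len(path) == shortest, paths))
--     else:
--         # no posible path between two switches
--         return []
-- ===== SOURCE B (Python) =====
-- def _keep_only_shortests(paths):
--     best = None
--     shortests = []
--     for path in paths:
--         length = len(path)
--         if best is None or length < best:
--             best = length
--             shortests = [path]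
--         elif length == best:
--             shortests.append(path)
--     return shortests
-- ===== Notes on version B (the rewrite author's own statement) =====
-- stated objective: alternative
-- what changed: Replaces A's two scans (find the minimum length, then filter) with a single online pass that keeps a running best length and resets/extends the accumulated list of shortest paths.
import Mathlib
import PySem

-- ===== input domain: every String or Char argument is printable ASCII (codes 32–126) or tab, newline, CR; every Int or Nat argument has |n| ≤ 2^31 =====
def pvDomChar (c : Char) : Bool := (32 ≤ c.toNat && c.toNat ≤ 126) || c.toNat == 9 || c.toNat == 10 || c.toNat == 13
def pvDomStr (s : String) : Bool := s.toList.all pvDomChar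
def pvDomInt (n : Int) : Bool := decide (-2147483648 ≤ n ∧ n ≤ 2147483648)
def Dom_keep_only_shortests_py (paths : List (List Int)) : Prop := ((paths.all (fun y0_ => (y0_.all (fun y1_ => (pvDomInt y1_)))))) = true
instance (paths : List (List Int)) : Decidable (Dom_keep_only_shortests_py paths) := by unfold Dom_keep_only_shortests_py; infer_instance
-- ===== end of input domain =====

-- B replaces A's two scans (min length, then filter) with one online pass; objective: alternative (same cost).

-- ===== PORT A =====
def keep_only_shortests_py (paths : List (List Int)) : List (List Int) :=
  match paths with
  | [] => []  -- no possible path between two switches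
  | p0 :: _ =>
    let shortest := paths.foldl (fun s path => if path.length < s then path.length else s) p0.length
    paths.filter (fun path => path.length == shortest)

-- ===== PORT B =====
-- one loop iteration of Source B: state = (best, shortests)
def keepStep (st : Option Nat × List (List Int)) (path : List Int) : Option Nat × List (List Int) :=
  match st with
  | (none, _) => (some path.length, [path])
  | (some b, acc) =>
    if path.length < b then (some path.length, [path])
    else if path.length == b then (some b, acc ++ [path])
    else (some b, acc)

def keep_only_shortests_py_alt (paths : List (List Int)) : List (List Int) :=
  (paths.foldl keepStep (none, [])).2

-- ===== PRECONDITION & SPEC =====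
def Spec_keep_only_shortests_py (paths : List (List Int)) (out : List (List Int)) : Prop := out = keep_only_shortests_py_alt paths
instance (paths : List (List Int)) (out : List (List Int)) : Decidable (Spec_keep_only_shortests_py paths out) := by unfold Spec_keep_only_shortests_py; infer_instance

-- ===== CLAIM (what is proved, stated in full; the proofs are below) =====
def Claim_equal_keep_only_shortests_py : Prop := ∀ (paths : List (List Int)), Dom_keep_only_shortests_py paths → Spec_keep_only_shortests_py paths (keep_only_shortests_py paths)

-- ===== LEMMAS AND PROOFS =====

-- A's running minimum never exceeds its seed
lemma foldMin_le : ∀ (t : List (List Int)) (b : Nat),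
    List.foldl (fun s path => if path.length < s then path.length else s) b t ≤ b
  | [], _ => le_refl _
  | p :: t, b => by
    simp only [List.foldl_cons]
    split
    · exact le_trans (foldMin_le t _) (le_of_lt ‹_›)
    · exact foldMin_le t b

-- invariant of B's loop once a best value is set, versus A's min-then-filter
lemma keepStep_key : ∀ (t : List (List Int)) (b : Nat) (acc : List (List Int)),
    List.foldl keepStep (some b, acc) t =
      (some (List.foldl (fun s path => if path.length < s then path.length else s) b t),
       (if List.foldl (fun s path => if path.length < s then path.length else s) b t = b then acc else [])
         ++ t.filter (fun path => path.length == List.foldl (fun s path => if path.length < s then path.length else s) b t))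
  | [], b, acc => by simp
  | p :: t, b, acc => by
    simp only [List.foldl_cons, List.filter_cons]
    by_cases h1 : p.length < b
    · have hle := foldMin_le t p.length
      simp only [if_pos h1]
      simp only [keepStep, if_pos h1]
      rw [keepStep_key t p.length [p]]
      have hne : ¬ (List.foldl (fun s path => if path.length < s then path.length else s) p.length t = b) := by omega
      rw [if_neg hne]
      by_cases h4 : List.foldl (fun s path => if path.length < s then path.length else s) p.length t = p.length
      · simp [h4]
      · simp [h4, Ne.symm h4]
    · simp only [if_neg h1]
      by_cases h2 : p.length = b
      · have hb2 : (p.length == b) = true := by simp [h2]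
        simp only [keepStep, if_neg h1, hb2, reduceIte]
        rw [keepStep_key t b (acc ++ [p])]
        by_cases h3 : List.foldl (fun s path => if path.length < s then path.length else s) b t = b
        · simp [h3, h2]
        · have hlt := foldMin_le t b
          have : ¬ (p.length == List.foldl (fun s path => if path.length < s then path.length else s) b t) = true := by
            simp; omega
          simp [h3, this]
      · have hb : (p.length == b) = false := by simp [h2]
        simp only [keepStep, if_neg h1, hb, Bool.false_eq_true, reduceIte]
        rw [keepStep_key t b acc]
        have hlt := foldMin_le t b
        have : ¬ (p.length == List.foldl (fun s path => if path.length < s then path.length else s) b t) = true := by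
          simp; omega
        simp [this]

-- ===== VERDICT (by name: the statement is the Claim_ definition above) =====
theorem keep_only_shortests_py_spec : Claim_equal_keep_only_shortests_py := by
  intro paths _
  unfold Spec_keep_only_shortests_py keep_only_shortests_py keep_only_shortests_py_alt
  match paths with
  | [] => rfl
  | p0 :: rest =>
    simp only [List.foldl_cons]
    have h0 : (if p0.length < p0.length then p0.length else p0.length) = p0.length := by simp
    rw [h0]
    simp only [keepStep]
    rw [keepStep_key rest p0.length [p0]]
    simp only [List.filter_cons]
    by_cases h : List.foldl (fun s path => if path.length < s then path.length else s) p0.length rest = p0.length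
    · simp [h]
    · have hlt := foldMin_le rest p0.length
      have : ¬ (p0.length == List.foldl (fun s path => if path.length < s then path.length else s) p0.length rest) = true := by
        simp; omega
      simp [h, this]
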